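-- pv_equiv track=rewrite | github.com/AlexeyKuzko/study_projects | stepik_algorithms_data_structures/6_advanced_sortings/3_quick_sort/step_3.py | quicksort_depth
-- ===== SOURCE A (Python) =====
-- def quicksort_depth(arr, depth):
--     if len(arr) <= 1:
--         return depth
--
--     mid_index = (len(arr) - 1) // 2
--     pivot = arr[mid_index]
--
--     less = [x for x in arr if x < pivot]
--     equal = [x for x in arr if x == pivot]
--     greater = [x for x in arr if x > pivot]
--
--     left_depth = quicksort_depth(less, depth + 1)
--     right_depth = quicksort_depth(greater, depth + 1)
--
--     return max(left_depth, right_depth)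
-- ===== SOURCE B (Python) =====
-- def quicksort_depth(arr, depth):
--     max_depth = depth
--     stack = [(arr, depth)]
--     while stack:
--         a, d = stack.pop()
--         if len(a) <= 1:
--             max_depth = max(max_depth, d)
--             continue
--         pivot = a[(len(a) - 1) // 2]
--         stack.append(([x for x in a if x < pivot], d + 1))
--         stack.append(([x for x in a if x > pivot], d + 1))
--     return max_depth
-- ===== Notes on version B (the rewrite author's own statement) =====
-- stated objective: alternative
-- what changed: Replaces A's tree recursion by an iterative loop over an explicit stack of (subarray, depth) frames with a running max_depth accumulator.
import Mathlib
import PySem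

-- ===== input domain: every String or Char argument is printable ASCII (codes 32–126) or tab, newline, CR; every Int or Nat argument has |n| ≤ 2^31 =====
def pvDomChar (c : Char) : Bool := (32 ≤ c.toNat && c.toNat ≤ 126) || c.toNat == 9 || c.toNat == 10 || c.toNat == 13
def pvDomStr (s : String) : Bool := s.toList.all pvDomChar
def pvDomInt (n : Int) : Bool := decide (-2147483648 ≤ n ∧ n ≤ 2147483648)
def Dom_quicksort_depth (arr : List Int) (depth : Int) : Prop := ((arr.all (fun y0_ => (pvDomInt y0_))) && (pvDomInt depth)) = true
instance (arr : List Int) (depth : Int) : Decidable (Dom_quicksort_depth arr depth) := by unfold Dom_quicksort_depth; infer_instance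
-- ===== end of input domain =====

-- B replaces A's tree recursion by an iterative loop over an explicit stack of
-- (subarray, depth) frames with a running max accumulator (alternative decomposition, same cost).


-- ===== PORT A =====
-- A's recursion, made structural with a fuel argument (fuel is only a totality guard:
-- arr.length + 1 always suffices, since the partitions are strictly shorter than arr)
def qdGo (fuel : Nat) (arr : List Int) (depth : Int) : Int :=
  match fuel with
  | 0 => depth
  | fuel + 1 =>
    if arr.length ≤ 1 then depth
    else
      let pivot := arr.getD ((arr.length - 1) / 2) 0
      let less := arr.filter (fun x => x < pivot)
      let _equal := arr.filter (fun x => x == pivot)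
      let greater := arr.filter (fun x => x > pivot)
      let left_depth := qdGo fuel less (depth + 1)
      let right_depth := qdGo fuel greater (depth + 1)
      max left_depth right_depth

def quicksort_depth (arr : List Int) (depth : Int) : Int :=
  qdGo (arr.length + 1) arr depth

-- ===== PORT B =====
-- the while loop over the explicit stack; list head = top of stack (greater was pushed last);
-- fuel is only a totality guard: each iteration shrinks the total frame weight, so
-- 2 * arr.length + 2 always suffices
def qdLoopGo (fuel : Nat) (stack : List (List Int × Int)) (max_depth : Int) : Int :=
  match fuel with
  | 0 => max_depth
  | fuel + 1 =>
    match stack with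
    | [] => max_depth
    | (a, d) :: st =>
      if a.length ≤ 1 then qdLoopGo fuel st (max max_depth d)
      else
        let pivot := a.getD ((a.length - 1) / 2) 0
        qdLoopGo fuel
          ((a.filter (fun x => x > pivot), d + 1) :: (a.filter (fun x => x < pivot), d + 1) :: st)
          max_depth

def quicksort_depth_alt (arr : List Int) (depth : Int) : Int :=
  qdLoopGo (2 * arr.length + 2) [(arr, depth)] depth

-- ===== PRECONDITION & SPEC =====
def Spec_quicksort_depth (arr : List Int) (depth : Int) (out : Int) : Prop := out = quicksort_depth_alt arr depth
instance (arr : List Int) (depth : Int) (out : Int) : Decidable (Spec_quicksort_depth arr depth out) := by unfold Spec_quicksort_depth; infer_instance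

-- ===== CLAIM (what is proved, stated in full; the proofs are below) =====
def Claim_equal_quicksort_depth : Prop := ∀ (arr : List Int) (depth : Int), Dom_quicksort_depth arr depth → Spec_quicksort_depth arr depth (quicksort_depth arr depth)

-- ===== LEMMAS AND PROOFS =====

-- the two strict partitions are jointly shorter than the list (pivot is in neither)
theorem pv_parts_le (l : List Int) (pivot : Int) :
    (l.filter (fun x => decide (x < pivot))).length + (l.filter (fun x => decide (pivot < x))).length ≤ l.length := by
  induction l with
  | nil => simp
  | cons a t ih =>
    by_cases h1 : a < pivot <;> by_cases h2 : pivot < a <;>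
      simp [List.filter_cons, h1, h2] <;> omega

theorem pv_parts_lt (l : List Int) (pivot : Int) (hmem : pivot ∈ l) :
    (l.filter (fun x => decide (x < pivot))).length + (l.filter (fun x => decide (pivot < x))).length < l.length := by
  induction l with
  | nil => cases hmem
  | cons a t ih =>
    rcases List.mem_cons.mp hmem with rfl | hat
    · have := pv_parts_le t pivot
      simp [List.filter_cons]
      omega
    · have := ih hat
      by_cases h1 : a < pivot <;> by_cases h2 : pivot < a <;>
        simp [List.filter_cons, h1, h2] <;> omega

theorem pv_mid_lt (arr : List Int) (h : ¬ arr.length ≤ 1) : (arr.length - 1) / 2 < arr.length := by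
  omega

theorem pv_pivot_mem (arr : List Int) (h : ¬ arr.length ≤ 1) :
    arr.getD ((arr.length - 1) / 2) 0 ∈ arr := by
  rw [List.getD_eq_getElem arr 0 (pv_mid_lt arr h)]
  exact List.getElem_mem _

theorem pv_parts_lt' (l : List Int) (pivot : Int) (hmem : pivot ∈ l) :
    (l.filter (fun x => decide (x < pivot))).length + (l.filter (fun x => decide (x > pivot))).length < l.length := by
  have h2 := pv_parts_lt l pivot hmem
  have e : (l.filter (fun x => decide (x > pivot))) = (l.filter (fun x => decide (pivot < x))) := rfl
  rw [e]
  exact h2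

-- the fuelled recursion is fuel-irrelevant once fuel exceeds arr.length
theorem pv_qdGo_fuel (fuel : Nat) (arr : List Int) (depth : Int) (hf : arr.length < fuel)
    (fuel' : Nat) (hf' : arr.length < fuel') :
    qdGo fuel arr depth = qdGo fuel' arr depth := by
  induction fuel generalizing arr depth fuel' with
  | zero => omega
  | succ fuel ih =>
    match fuel', hf' with
    | fuel' + 1, hf' =>
      rw [qdGo, qdGo]
      by_cases h : arr.length ≤ 1
      · simp only [h, if_true]
      · simp only [h, if_false]
        have hp := pv_parts_lt' arr _ (pv_pivot_mem arr h)
        rw [ih (arr.filter (fun x => x < arr.getD ((arr.length - 1) / 2) 0)) (depth + 1)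
              (by omega) fuel' (by omega),
            ih (arr.filter (fun x => x > arr.getD ((arr.length - 1) / 2) 0)) (depth + 1)
              (by omega) fuel' (by omega)]

-- base and step equations of port A (for ample fuel)
theorem pv_qd_base (arr : List Int) (depth : Int) (h : arr.length ≤ 1) :
    quicksort_depth arr depth = depth := by
  unfold quicksort_depth
  rw [qdGo]
  simp only [h, if_true]

theorem pv_qd_rec (arr : List Int) (depth : Int) (h : ¬ arr.length ≤ 1) :
    quicksort_depth arr depth =
      max (quicksort_depth (arr.filter (fun x => x < arr.getD ((arr.length - 1) / 2) 0)) (depth + 1))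
          (quicksort_depth (arr.filter (fun x => x > arr.getD ((arr.length - 1) / 2) 0)) (depth + 1)) := by
  unfold quicksort_depth
  rw [qdGo]
  simp only [h, if_false]
  have hp := pv_parts_lt' arr _ (pv_pivot_mem arr h)
  rw [pv_qdGo_fuel arr.length (arr.filter (fun x => x < arr.getD ((arr.length - 1) / 2) 0))
        (depth + 1) (by omega)
        ((arr.filter (fun x => x < arr.getD ((arr.length - 1) / 2) 0)).length + 1) (by omega),
      pv_qdGo_fuel arr.length (arr.filter (fun x => x > arr.getD ((arr.length - 1) / 2) 0))
        (depth + 1) (by omega)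
        ((arr.filter (fun x => x > arr.getD ((arr.length - 1) / 2) 0)).length + 1) (by omega)]

-- the recursion result never drops below the incoming depth
theorem pv_le_qd (arr : List Int) (depth : Int) : depth ≤ quicksort_depth arr depth := by
  by_cases h : arr.length ≤ 1
  · rw [pv_qd_base arr depth h]
  · rw [pv_qd_rec arr depth h]
    have := pv_le_qd (arr.filter (fun x => x < arr.getD ((arr.length - 1) / 2) 0)) (depth + 1)
    omega
termination_by arr.length
decreasing_by
  have := pv_parts_lt' arr _ (pv_pivot_mem arr h)
  omega

-- weight of a stack of frames: each iteration of the loop strictly decreases it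
def pvWeight (stack : List (List Int × Int)) : Nat :=
  (stack.map (fun p => 2 * p.1.length + 1)).sum

theorem pv_loopGo_nil (f : Nat) (m : Int) : qdLoopGo f [] m = m := by
  cases f <;> rfl

-- the fuelled loop is fuel-irrelevant once fuel covers the stack weight
theorem pv_loopGo_fuel (f : Nat) (st : List (List Int × Int)) (m : Int)
    (hf : pvWeight st ≤ f) (f' : Nat) (hf' : pvWeight st ≤ f') :
    qdLoopGo f st m = qdLoopGo f' st m := by
  induction f using Nat.strong_induction_on generalizing st m f' with
  | _ f ih =>
    match st with
    | [] => rw [pv_loopGo_nil, pv_loopGo_nil]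
    | (a, d) :: st' =>
      have hw : pvWeight ((a, d) :: st') = 2 * a.length + 1 + pvWeight st' := by
        simp [pvWeight]
      obtain ⟨f0, rfl⟩ : ∃ k, f = k + 1 := ⟨f - 1, by omega⟩
      obtain ⟨f0', rfl⟩ : ∃ k, f' = k + 1 := ⟨f' - 1, by omega⟩
      rw [qdLoopGo, qdLoopGo]
      by_cases h : a.length ≤ 1
      · simp only [h, if_true]
        exact ih f0 (by omega) st' (max m d) (by omega) f0' (by omega)
      · simp only [h, if_false]
        have hp := pv_parts_lt' a _ (pv_pivot_mem a h)
        have hw2 : pvWeight ((a.filter (fun x => x > a.getD ((a.length - 1) / 2) 0), d + 1) ::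
              (a.filter (fun x => x < a.getD ((a.length - 1) / 2) 0), d + 1) :: st')
            = 2 * (a.filter (fun x => x > a.getD ((a.length - 1) / 2) 0)).length + 1
              + (2 * (a.filter (fun x => x < a.getD ((a.length - 1) / 2) 0)).length + 1
                + pvWeight st') := by
          simp [pvWeight]
        exact ih f0 (by omega) _ m (by omega) f0' (by omega)

-- processing the top frame folds A's recursive answer into the accumulator (for ample fuel)
theorem pv_loop_frame (fuel : Nat) (a : List Int) (d : Int) (st : List (List Int × Int))
    (m : Int) (hf : pvWeight ((a, d) :: st) ≤ fuel) :
    qdLoopGo fuel ((a, d) :: st) m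
      = qdLoopGo (fuel - (2 * a.length + 1)) st (max m (quicksort_depth a d)) := by
  induction fuel using Nat.strong_induction_on generalizing a d st m with
  | _ fuel ih =>
    have hw : pvWeight ((a, d) :: st) = 2 * a.length + 1 + pvWeight st := by
      simp [pvWeight]
    obtain ⟨f0, rfl⟩ : ∃ k, fuel = k + 1 := ⟨fuel - 1, by omega⟩
    rw [qdLoopGo]
    by_cases h : a.length ≤ 1
    · simp only [h, if_true, pv_qd_base a d h]
      exact pv_loopGo_fuel f0 st (max m d) (by omega) _ (by omega)
    · simp only [h, if_false]
      have hp := pv_parts_lt' a _ (pv_pivot_mem a h)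
      have hw2 : pvWeight ((a.filter (fun x => x > a.getD ((a.length - 1) / 2) 0), d + 1) ::
            (a.filter (fun x => x < a.getD ((a.length - 1) / 2) 0), d + 1) :: st)
          = 2 * (a.filter (fun x => x > a.getD ((a.length - 1) / 2) 0)).length + 1
            + (2 * (a.filter (fun x => x < a.getD ((a.length - 1) / 2) 0)).length + 1
              + pvWeight st) := by
        simp [pvWeight]
      have hw3 : pvWeight ((a.filter (fun x => x < a.getD ((a.length - 1) / 2) 0), d + 1) :: st)
          = 2 * (a.filter (fun x => x < a.getD ((a.length - 1) / 2) 0)).length + 1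
            + pvWeight st := by
        simp [pvWeight]
      rw [ih f0 (by omega) _ (d + 1) _ m (by omega)]
      rw [ih (f0 - (2 * (a.filter (fun x => x > a.getD ((a.length - 1) / 2) 0)).length + 1))
          (by omega) _ (d + 1) _ _ (by omega)]
      rw [pv_qd_rec a d h]
      rw [pv_loopGo_fuel _ st _ (by omega) (f0 + 1 - (2 * a.length + 1)) (by omega)]
      congr 1
      omega

-- ===== VERDICT (by name: the statement is the Claim_ definition above) =====
theorem quicksort_depth_spec : Claim_equal_quicksort_depth := by
  intro arr depth _
  unfold Spec_quicksort_depth quicksort_depth_alt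
  rw [pv_loop_frame _ arr depth [] depth (by simp [pvWeight])]
  have h2 : 2 * arr.length + 2 - (2 * arr.length + 1) = 1 := by omega
  rw [h2, pv_loopGo_nil]
  have := pv_le_qd arr depth
  omega
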